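-- pv_equiv track=rewrite | github.com/Danielkaas94/Any-Colour-You-Like | code/python/Kata7.py | square_digits4
-- ===== SOURCE A (Python) =====
-- def square_digits4(num):
--     # s converts num to a str so we can index through it
--     # when then loop through the len of the str
--     # while we're looping the string we convert it back to a int and square it
--     # after we add it to a str to keep it from adding and then convert it to a int
--     s = str(num)
--     t = len(s)
--     y=0
--     g= 0
--     b=""
--     while y < t:
--         g = int(s[y])**2
--         b= b+ str(g)
--         final = int(b)
--         y=y+1
--     return(final)
--     pass
-- ===== SOURCE B (Python) =====
-- def square_digits4(num):
--     result = 0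
--     for c in str(num):
--         sq = int(c) ** 2
--         result = result * 10 ** len(str(sq)) + sq
--     return result
-- ===== Notes on version B (the rewrite author's own statement) =====
-- stated objective: simpler
-- what changed: B drops A's string accumulator entirely: instead of appending str(digit**2) to a string and re-parsing the whole string with int() on every iteration, B keeps the result as an integer and shifts it left by the decimal width of each square before adding it, in one pass.
import Mathlib
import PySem

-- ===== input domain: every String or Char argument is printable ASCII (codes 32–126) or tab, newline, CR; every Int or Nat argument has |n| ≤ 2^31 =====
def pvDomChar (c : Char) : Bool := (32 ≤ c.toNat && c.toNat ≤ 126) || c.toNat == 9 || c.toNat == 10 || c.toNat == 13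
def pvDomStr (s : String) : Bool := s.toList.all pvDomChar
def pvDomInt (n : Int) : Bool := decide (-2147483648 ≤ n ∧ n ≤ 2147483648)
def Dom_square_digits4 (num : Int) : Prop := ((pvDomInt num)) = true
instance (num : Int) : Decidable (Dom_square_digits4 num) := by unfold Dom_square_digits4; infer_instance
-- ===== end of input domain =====

-- B replaces A's string accumulator (append str(digit**2), reparse the whole string with int()
-- every iteration) by a single integer accumulator shifted by the width of each square.

-- ===== PORT A =====
-- Python's int(b) for the strings A's loop builds: b is always a nonempty concatenation of
-- str(g) outputs for g ≥ 0, i.e. a nonempty string of ASCII decimal digits, on which int()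
-- is exactly base-10 digit folding.  Ported by hand (exact on such strings) because the
-- prelude's full int() parser is built from private helpers the proofs cannot reach.
def pyIntDigits (cs : List Char) : Int :=
  Int.ofNat (cs.foldl (fun a c => a * 10 + (c.toNat - '0'.toNat)) 0)

-- A's `while y < t` loop with state (y, b, final).  Inside the loop y < t, so s[y] = s.getD y.
-- int(s[y]) is a one-character int(): PySem.Int.ofChars?; `.getD 0` stands where Python raises
-- ValueError (the '-' of a negative num), excluded by Pre_square_digits4.
def squareDigitsLoopA (s : List Char) (t y : Nat) (b : List Char) (final : Int) : Int :=
  if y < t then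
    let g : Int := ((PySem.Int.ofChars? [s.getD y ' ']).getD 0) ^ 2
    let b' := b ++ PySem.Int.toChars g
    let final' := pyIntDigits b'
    squareDigitsLoopA s t (y + 1) b' final'
  else final
  termination_by t - y

-- Python's `final` is unassigned before the first iteration; str(num) is never empty, so the
-- loop always runs and the initial 0 below is never returned.
def square_digits4 (num : Int) : Int :=
  let s := PySem.Int.toChars num
  squareDigitsLoopA s s.length 0 [] 0

-- ===== PORT B =====
def square_digits4_alt (num : Int) : Int :=
  (PySem.Int.toChars num).foldl
    (fun result c =>
      let sq : Int := ((PySem.Int.ofChars? [c]).getD 0) ^ 2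
      result * 10 ^ (PySem.Int.toChars sq).length + sq)
    0

-- ===== PRECONDITION & SPEC =====
-- Pre_ excludes exactly the negative num, on which Python's int('-') raises ValueError in A
-- (and in B alike).
def Pre_square_digits4 (num : Int) : Prop := 0 ≤ num
instance (num : Int) : Decidable (Pre_square_digits4 num) := by unfold Pre_square_digits4; infer_instance
def pvWitness_square_digits4 : Int := (9119)

def Spec_square_digits4 (num : Int) (out : Int) : Prop := out = square_digits4_alt num
instance (num : Int) (out : Int) : Decidable (Spec_square_digits4 num out) := by unfold Spec_square_digits4; infer_instance

-- ===== CLAIM (what is proved, stated in full; the proofs are below) =====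
def Claim_equal_square_digits4 : Prop := ∀ (num : Int), Dom_square_digits4 num → Pre_square_digits4 num → Spec_square_digits4 num (square_digits4 num)

-- ===== LEMMAS AND PROOFS =====

-- `Nat.toDigits 10` rephrased as a structural recursion the proofs can induct on.
def decChars (n : Nat) : List Char :=
  if _h : n < 10 then [Nat.digitChar n]
  else decChars (n / 10) ++ [Nat.digitChar (n % 10)]
decreasing_by exact Nat.div_lt_self (by omega) (by omega)

theorem toDigitsCore_eq (f n : Nat) (acc : List Char) (h : n < f) :
    Nat.toDigitsCore 10 f n acc = decChars n ++ acc := by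
  induction f generalizing n acc with
  | zero => omega
  | succ f ih =>
    rw [Nat.toDigitsCore]
    by_cases hn : n < 10
    · have h10 : n / 10 = 0 := Nat.div_eq_of_lt hn
      simp only [h10, if_pos]
      rw [decChars]
      simp [hn, Nat.mod_eq_of_lt hn]
    · have h10 : n / 10 ≠ 0 := by
        intro hz
        have := Nat.div_eq_of_lt (show n < 10 from by omega)
        omega
      have hlt : n / 10 < f := by
        have h1 : n / 10 < n := Nat.div_lt_self (by omega) (by omega)
        omega
      simp only [h10]
      rw [ih _ _ hlt]
      conv_rhs => rw [decChars]
      simp [hn]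

theorem toDigits_eq (n : Nat) : Nat.toDigits 10 n = decChars n := by
  simpa using toDigitsCore_eq (n + 1) n [] (by omega)

theorem digitChar_isDigit (m : Nat) (h : m < 10) : (Nat.digitChar m).isDigit = true := by
  interval_cases m <;> decide

theorem decChars_digits (n : Nat) : ∀ c ∈ decChars n, c.isDigit = true := by
  induction n using Nat.strong_induction_on with
  | _ n ih =>
    rw [decChars]
    by_cases hn : n < 10
    · rw [dif_pos hn]
      intro c hc
      rw [List.mem_singleton] at hc
      subst hc
      exact digitChar_isDigit n hn
    · rw [dif_neg hn]
      intro c hc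
      rcases List.mem_append.mp hc with hc' | hc'
      · exact ih (n / 10) (Nat.div_lt_self (by omega) (by omega)) c hc'
      · rw [List.mem_singleton] at hc'
        subst hc'
        exact digitChar_isDigit _ (Nat.mod_lt _ (by omega))

theorem toChars_digits (num : Int) (h : 0 ≤ num) :
    ∀ c ∈ PySem.Int.toChars num, c.isDigit = true := by
  unfold PySem.Int.toChars
  rw [if_neg (by omega)]
  rw [toDigits_eq]
  exact decChars_digits _

theorem digit_cases (c : Char) (h : c.isDigit = true) :
    c = '0' ∨ c = '1' ∨ c = '2' ∨ c = '3' ∨ c = '4' ∨ c = '5' ∨ c = '6' ∨ c = '7' ∨ c = '8' ∨ c = '9' := by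
  have hb : 48 ≤ c.toNat ∧ c.toNat ≤ 57 := by
    simp only [Char.isDigit, Bool.and_eq_true, decide_eq_true_eq] at h
    exact ⟨UInt32.le_iff_toNat_le.mp h.1, UInt32.le_iff_toNat_le.mp h.2⟩
  have h10 : c.toNat = 48 ∨ c.toNat = 49 ∨ c.toNat = 50 ∨ c.toNat = 51 ∨ c.toNat = 52 ∨ c.toNat = 53 ∨
      c.toNat = 54 ∨ c.toNat = 55 ∨ c.toNat = 56 ∨ c.toNat = 57 := by omega
  rcases h10 with h'|h'|h'|h'|h'|h'|h'|h'|h'|h'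
  · exact Or.inl (Char.ext (UInt32.toNat_inj.mp h'))
  · exact Or.inr (Or.inl (Char.ext (UInt32.toNat_inj.mp h')))
  · exact Or.inr (Or.inr (Or.inl (Char.ext (UInt32.toNat_inj.mp h'))))
  · exact Or.inr (Or.inr (Or.inr (Or.inl (Char.ext (UInt32.toNat_inj.mp h')))))
  · exact Or.inr (Or.inr (Or.inr (Or.inr (Or.inl (Char.ext (UInt32.toNat_inj.mp h'))))))
  · exact Or.inr (Or.inr (Or.inr (Or.inr (Or.inr (Or.inl (Char.ext (UInt32.toNat_inj.mp h')))))))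
  · exact Or.inr (Or.inr (Or.inr (Or.inr (Or.inr (Or.inr (Or.inl (Char.ext (UInt32.toNat_inj.mp h'))))))))
  · exact Or.inr (Or.inr (Or.inr (Or.inr (Or.inr (Or.inr (Or.inr (Or.inl (Char.ext (UInt32.toNat_inj.mp h')))))))))
  · exact Or.inr (Or.inr (Or.inr (Or.inr (Or.inr (Or.inr (Or.inr (Or.inr (Or.inl (Char.ext (UInt32.toNat_inj.mp h'))))))))))
  · exact Or.inr (Or.inr (Or.inr (Or.inr (Or.inr (Or.inr (Or.inr (Or.inr (Or.inr (Char.ext (UInt32.toNat_inj.mp h'))))))))))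

-- the digit-fold A's hand-ported int() performs, with a running accumulator
def valAcc (a : Nat) (cs : List Char) : Nat :=
  cs.foldl (fun a c => a * 10 + (c.toNat - '0'.toNat)) a

theorem valAcc_append (a : Nat) (xs ys : List Char) :
    valAcc a (xs ++ ys) = valAcc (valAcc a xs) ys :=
  List.foldl_append

-- per-digit facts about g = int(c)**2: its integer value and how its decimal characters fold
theorem sq_val (c : Char) (h : c.isDigit = true) :
    ((PySem.Int.ofChars? [c]).getD 0) ^ 2 = Int.ofNat ((c.toNat - '0'.toNat) ^ 2) := by
  rcases digit_cases c h with rfl|rfl|rfl|rfl|rfl|rfl|rfl|rfl|rfl|rfl <;> decide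

theorem sq_chars_fold (c : Char) (h : c.isDigit = true) (a : Nat) :
    valAcc a (PySem.Int.toChars (Int.ofNat ((c.toNat - '0'.toNat) ^ 2)))
      = a * 10 ^ (PySem.Int.toChars (Int.ofNat ((c.toNat - '0'.toNat) ^ 2))).length
        + (c.toNat - '0'.toNat) ^ 2 := by
  rcases digit_cases c h with rfl|rfl|rfl|rfl|rfl|rfl|rfl|rfl|rfl|rfl
  · rw [show ('0'.toNat - '0'.toNat) = 0 from by decide,
        show PySem.Int.toChars (Int.ofNat (0 ^ 2)) = ['0'] from by decide]
    simp only [valAcc, List.foldl, List.length_cons, List.length_nil, show ('0'.toNat - '0'.toNat) = 0 from by decide]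
    ring
  · rw [show ('1'.toNat - '0'.toNat) = 1 from by decide,
        show PySem.Int.toChars (Int.ofNat (1 ^ 2)) = ['1'] from by decide]
    simp only [valAcc, List.foldl, List.length_cons, List.length_nil, show ('1'.toNat - '0'.toNat) = 1 from by decide]
    ring
  · rw [show ('2'.toNat - '0'.toNat) = 2 from by decide,
        show PySem.Int.toChars (Int.ofNat (2 ^ 2)) = ['4'] from by decide]
    simp only [valAcc, List.foldl, List.length_cons, List.length_nil, show ('4'.toNat - '0'.toNat) = 4 from by decide]
    ring
  · rw [show ('3'.toNat - '0'.toNat) = 3 from by decide,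
        show PySem.Int.toChars (Int.ofNat (3 ^ 2)) = ['9'] from by decide]
    simp only [valAcc, List.foldl, List.length_cons, List.length_nil, show ('9'.toNat - '0'.toNat) = 9 from by decide]
    ring
  · rw [show ('4'.toNat - '0'.toNat) = 4 from by decide,
        show PySem.Int.toChars (Int.ofNat (4 ^ 2)) = ['1', '6'] from by decide]
    simp only [valAcc, List.foldl, List.length_cons, List.length_nil, show ('1'.toNat - '0'.toNat) = 1 from by decide, show ('6'.toNat - '0'.toNat) = 6 from by decide]
    ring
  · rw [show ('5'.toNat - '0'.toNat) = 5 from by decide,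
        show PySem.Int.toChars (Int.ofNat (5 ^ 2)) = ['2', '5'] from by decide]
    simp only [valAcc, List.foldl, List.length_cons, List.length_nil, show ('2'.toNat - '0'.toNat) = 2 from by decide, show ('5'.toNat - '0'.toNat) = 5 from by decide]
    ring
  · rw [show ('6'.toNat - '0'.toNat) = 6 from by decide,
        show PySem.Int.toChars (Int.ofNat (6 ^ 2)) = ['3', '6'] from by decide]
    simp only [valAcc, List.foldl, List.length_cons, List.length_nil, show ('3'.toNat - '0'.toNat) = 3 from by decide, show ('6'.toNat - '0'.toNat) = 6 from by decide]
    ring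
  · rw [show ('7'.toNat - '0'.toNat) = 7 from by decide,
        show PySem.Int.toChars (Int.ofNat (7 ^ 2)) = ['4', '9'] from by decide]
    simp only [valAcc, List.foldl, List.length_cons, List.length_nil, show ('4'.toNat - '0'.toNat) = 4 from by decide, show ('9'.toNat - '0'.toNat) = 9 from by decide]
    ring
  · rw [show ('8'.toNat - '0'.toNat) = 8 from by decide,
        show PySem.Int.toChars (Int.ofNat (8 ^ 2)) = ['6', '4'] from by decide]
    simp only [valAcc, List.foldl, List.length_cons, List.length_nil, show ('6'.toNat - '0'.toNat) = 6 from by decide, show ('4'.toNat - '0'.toNat) = 4 from by decide]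
    ring
  · rw [show ('9'.toNat - '0'.toNat) = 9 from by decide,
        show PySem.Int.toChars (Int.ofNat (9 ^ 2)) = ['8', '1'] from by decide]
    simp only [valAcc, List.foldl, List.length_cons, List.length_nil, show ('8'.toNat - '0'.toNat) = 8 from by decide, show ('1'.toNat - '0'.toNat) = 1 from by decide]
    ring

-- A's loop, re-expressed as a structural recursion over the unread suffix of s
def afold : List Char → List Char → Int → Int
  | [], _, final => final
  | c :: rest, b, _ =>
      let g : Int := ((PySem.Int.ofChars? [c]).getD 0) ^ 2
      let b' := b ++ PySem.Int.toChars g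
      afold rest b' (pyIntDigits b')

theorem loopA_eq_afold (s : List Char) (y : Nat) (b : List Char) (f : Int)
    (hy : y ≤ s.length) :
    squareDigitsLoopA s s.length y b f = afold (s.drop y) b f := by
  generalize hrest : s.drop y = rest
  induction rest generalizing y b f with
  | nil =>
    have : y = s.length := by
      have := List.drop_eq_nil_iff.mp hrest
      omega
    rw [squareDigitsLoopA, if_neg (by omega)]
    rfl
  | cons c rest ih =>
    have hlt : y < s.length := by
      by_contra hge
      rw [List.drop_eq_nil_of_le (by omega)] at hrest
      simp at hrest
    have hget : s.getD y ' ' = c := by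
      have h1 : s.drop y = s[y] :: s.drop (y + 1) := List.drop_eq_getElem_cons hlt
      rw [h1] at hrest
      have : s[y] = c := (List.cons.injEq _ _ _ _ ▸ hrest).1
      simp [List.getD, this, hlt]
    rw [squareDigitsLoopA, if_pos hlt]
    simp only [hget]
    have hdrop : s.drop (y + 1) = rest := by
      have h1 : s.drop y = s[y] :: s.drop (y + 1) := List.drop_eq_getElem_cons hlt
      rw [h1] at hrest
      exact (List.cons.injEq _ _ _ _ ▸ hrest).2
    rw [ih (y + 1) _ _ (by omega) hdrop]
    rfl

-- the loop invariant: with b folding to r, A's remaining loop equals B's remaining fold from r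
theorem afold_eq_bfold (rest : List Char) (hd : ∀ c ∈ rest, c.isDigit = true) (b : List Char) :
    afold rest b (Int.ofNat (valAcc 0 b)) =
      rest.foldl
        (fun result c =>
          let sq : Int := ((PySem.Int.ofChars? [c]).getD 0) ^ 2
          result * 10 ^ (PySem.Int.toChars sq).length + sq)
        (Int.ofNat (valAcc 0 b)) := by
  induction rest generalizing b with
  | nil => rfl
  | cons c rest ih =>
    have hc : c.isDigit = true := hd c (by simp)
    rw [afold, List.foldl_cons]
    simp only [sq_val c hc]
    have hval : valAcc 0 (b ++ PySem.Int.toChars (Int.ofNat ((c.toNat - '0'.toNat) ^ 2)))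
        = valAcc 0 b * 10 ^ (PySem.Int.toChars (Int.ofNat ((c.toNat - '0'.toNat) ^ 2))).length
          + (c.toNat - '0'.toNat) ^ 2 := by
      rw [valAcc_append, sq_chars_fold c hc]
    have hstep :
        Int.ofNat (valAcc 0 b) * 10 ^ (PySem.Int.toChars (Int.ofNat ((c.toNat - '0'.toNat) ^ 2))).length
          + Int.ofNat ((c.toNat - '0'.toNat) ^ 2)
        = Int.ofNat (valAcc 0 (b ++ PySem.Int.toChars (Int.ofNat ((c.toNat - '0'.toNat) ^ 2)))) := by
      rw [hval]
      simp only [Int.ofNat_eq_natCast]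
      push_cast
      ring
    have hfinal : pyIntDigits (b ++ PySem.Int.toChars (Int.ofNat ((c.toNat - '0'.toNat) ^ 2)))
        = Int.ofNat (valAcc 0 (b ++ PySem.Int.toChars (Int.ofNat ((c.toNat - '0'.toNat) ^ 2)))) := rfl
    rw [hfinal, ih (fun x hx => hd x (List.mem_cons_of_mem _ hx)) _, hstep]

-- ===== VERDICT (by name: the statement is the Claim_ definition above) =====
theorem square_digits4_spec : Claim_equal_square_digits4 := by
  intro num _hdom hpre
  unfold Spec_square_digits4 square_digits4 square_digits4_alt
  rw [loopA_eq_afold _ 0 [] 0 (by omega)]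
  simpa using afold_eq_bfold (PySem.Int.toChars num) (toChars_digits num hpre) []
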